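-- pv_equiv track=rewrite | github.com/AleksandarGanchev/SoftUni | Python Fundamentals/Basic Syntax, Conditional Statements and Loops - More Exercises/03. Wolf In Sheep's Clothing.py | function
-- ===== SOURCE A (Python) =====
-- def function(animals):
--     if animals[-1] == 'wolf':
--         return "Please go away and stop eating my sheep"
--     else:
--         counter = 0
--         for animal in reversed(animals):
--             if animal == 'wolf':
--                 return f"Oi! Sheep number {counter}! You are about to be eaten by a wolf!"
--             counter += 1
-- ===== SOURCE B (Python) =====
-- def function(animals):
--     if animals[-1] == 'wolf':
--         return "Please go away and stop eating my sheep"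
--     last = None
--     for i, animal in enumerate(animals):
--         if animal == 'wolf':
--             last = i
--     if last is None:
--         return None
--     return f"Oi! Sheep number {len(animals) - 1 - last}! You are about to be eaten by a wolf!"
-- ===== Notes on version B (the rewrite author's own statement) =====
-- stated objective: alternative
-- what changed: replaces the reverse scan that counts while searching with a forward pass recording the last wolf's index, deriving the sheep number afterwards by arithmetic (len-1-index)
import Mathlib
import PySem

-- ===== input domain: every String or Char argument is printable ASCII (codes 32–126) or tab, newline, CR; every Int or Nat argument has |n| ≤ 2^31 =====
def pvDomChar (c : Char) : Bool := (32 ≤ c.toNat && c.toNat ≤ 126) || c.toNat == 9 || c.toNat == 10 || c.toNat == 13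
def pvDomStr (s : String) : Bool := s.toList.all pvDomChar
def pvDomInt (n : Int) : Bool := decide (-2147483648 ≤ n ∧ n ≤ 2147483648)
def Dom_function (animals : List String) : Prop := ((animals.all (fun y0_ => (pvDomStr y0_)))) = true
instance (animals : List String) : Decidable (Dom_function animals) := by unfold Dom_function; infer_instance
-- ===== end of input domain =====

-- B replaces A's reverse counting scan with a forward pass that records the last wolf's
-- index and derives the sheep number by arithmetic; same O(n) cost, different decomposition.


-- the message for sheep number n (shared literal text of both Pythons)
def mkMsg (n : Int) : String :=
  "Oi! Sheep number " ++ PySem.Int.toStr n ++ "! You are about to be eaten by a wolf!"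

-- ===== PORT A =====
-- the reverse loop: counter starts at c, returns the message at the first 'wolf'
def loopA : List String → Int → Option String
  | [], _ => none
  | a :: rest, c => if a = "wolf" then some (mkMsg c) else loopA rest (c + 1)

def function (animals : List String) : Option String :=
  match PySem.List.pyGet? animals (-1) with
  | none => none        -- animals[-1] raises IndexError on []: outside Pre_
  | some lastEl =>
    if lastEl = "wolf" then some "Please go away and stop eating my sheep"
    else loopA animals.reverse 0

-- ===== PORT B =====
-- forward enumerate pass: records the index of the most recent 'wolf' into `last`
def loopB : List String → Int → Option Int → Option Int
  | [], _, last => last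
  | a :: rest, i, last => loopB rest (i + 1) (if a = "wolf" then some i else last)

def function_alt (animals : List String) : Option String :=
  match PySem.List.pyGet? animals (-1) with
  | none => none        -- animals[-1] raises IndexError on []: outside Pre_
  | some lastEl =>
    if lastEl = "wolf" then some "Please go away and stop eating my sheep"
    else
      match loopB animals 0 none with
      | none => none
      | some last => some (mkMsg ((animals.length : Int) - 1 - last))

-- ===== PRECONDITION & SPEC =====
-- Pre_ excludes only the empty list, on which Python A raises IndexError at animals[-1].
def Pre_function (animals : List String) : Prop := animals ≠ []
instance (animals : List String) : Decidable (Pre_function animals) := by unfold Pre_function; infer_instance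
def pvWitness_function : List String := ["sheep", "wolf", "sheep"]
def Spec_function (animals : List String) (out : Option String) : Prop := out = function_alt animals
instance (animals : List String) (out : Option String) : Decidable (Spec_function animals out) := by unfold Spec_function; infer_instance

-- ===== CLAIM (what is proved, stated in full; the proofs are below) =====
def Claim_equal_function : Prop := ∀ (animals : List String), Dom_function animals → Pre_function animals → Spec_function animals (function animals)

-- ===== LEMMAS AND PROOFS =====

-- index of the LAST 'wolf' in the list, as a pure recursive characterisation
def lastWolf : List String → Option Nat
  | [] => none
  | x :: xs =>
    match lastWolf xs with
    | some j => some (j + 1)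
    | none => if x = "wolf" then some 0 else none

theorem loopB_spec (xs : List String) (i : Int) (acc : Option Int) :
    loopB xs i acc = match lastWolf xs with
      | some j => some (i + (j : Int))
      | none => acc := by
  induction xs generalizing i acc with
  | nil => simp [loopB, lastWolf]
  | cons x xs ih =>
    simp only [loopB, lastWolf, ih]
    cases h : lastWolf xs with
    | some j => simp; omega
    | none => by_cases hx : x = "wolf" <;> simp [hx]

theorem loopA_append (ys : List String) (a : String) (c : Int) :
    loopA (ys ++ [a]) c = match loopA ys c with
      | some r => some r
      | none => if a = "wolf" then some (mkMsg (c + ys.length)) else none := by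
  induction ys generalizing c with
  | nil => simp [loopA]
  | cons y ys ih =>
    simp only [List.cons_append, loopA]
    by_cases hy : y = "wolf"
    · simp [hy]
    · simp only [hy, ih]
      cases h : loopA ys (c + 1) <;> simp <;> ring_nf

theorem loopA_spec (xs : List String) (c : Int) :
    loopA xs.reverse c = match lastWolf xs with
      | none => none
      | some j => some (mkMsg (c + (xs.length : Int) - 1 - (j : Int))) := by
  induction xs generalizing c with
  | nil => simp [loopA, lastWolf]
  | cons x xs ih =>
    rw [List.reverse_cons, loopA_append, ih]
    cases h : lastWolf xs with
    | some j =>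
      have e : c + ((x :: xs).length : Int) - 1 - ((j + 1 : Nat) : Int)
             = c + (xs.length : Int) - 1 - (j : Int) := by
        simp only [List.length_cons]; push_cast; omega
      simp only [lastWolf, h, e]
    | none =>
      simp only [lastWolf, h]
      by_cases hx : x = "wolf"
      · simp [hx]
        congr 1
        omega
      · simp [hx]

-- ===== VERDICT (by name: the statement is the Claim_ definition above) =====
theorem function_spec : Claim_equal_function := by
  intro animals _ _
  unfold Spec_function function function_alt
  cases hget : PySem.List.pyGet? animals (-1) with
  | none => rfl
  | some lastEl =>
    simp only
    by_cases hw : lastEl = "wolf"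
    · simp [hw]
    · simp only [hw, loopA_spec, loopB_spec]
      cases h : lastWolf animals with
      | none => simp
      | some j =>
        have e : (0 : Int) + (animals.length : Int) - 1 - (j : Int)
               = (animals.length : Int) - 1 - ((0 : Int) + (j : Int)) := by omega
        simp only [e]
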